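-- pv_equiv track=rewrite | github.com/SLP25/DNS | common/utils.py | is_subdomain
-- ===== SOURCE A (Python) =====
-- def split_domain(domain:str) -> list[str]:
--     """
--     Given a valid domain name (that matches DOMAIN or FULL_DOMAIN regexes), returns a list
--     with the subdomains, from highest to lowest hierarchically
--
--     Examples:
--         example.com. -> ['com', 'example']
--         .            -> []
--     """
--     ans = list(filter(None, domain.lower().split('.')))
--     ans.reverse()
--     return ans
--
-- def is_subdomain(subdomain:str, domain:str) -> bool:
--     """
--     Given two valid domain names (that match DOMAIN or FULL_DOMAIN regexes),
--     determines whether the subdomain is hierarchically below the domain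
--
--     Examples:
--         example.com. .          -> True
--         com.         com.       -> True
--         google.com.  abc.com.   -> False
--     """
--     sd = split_domain(subdomain)
--     d = split_domain(domain)
--
--     if len(sd) < len(d):
--         return False
--
--     for i,x in enumerate(d):
--         if x != sd[i]:
--             return False
--
--     return True
-- ===== SOURCE B (Python) =====
-- def is_subdomain(subdomain, domain):
--     sd = [l for l in subdomain.lower().split('.') if l]
--     d = [l for l in domain.lower().split('.') if l]
--     return len(d) <= len(sd) and sd[len(sd) - len(d):] == d
-- ===== Notes on version B (the rewrite author's own statement) =====
-- stated objective: simpler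
-- what changed: B keeps the label lists in their original order and decides the question with one tail-slice-and-compare (sd[len(sd)-len(d):] == d) instead of A's reversal of both lists followed by an element-wise indexed prefix loop with early return.
import Mathlib
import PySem

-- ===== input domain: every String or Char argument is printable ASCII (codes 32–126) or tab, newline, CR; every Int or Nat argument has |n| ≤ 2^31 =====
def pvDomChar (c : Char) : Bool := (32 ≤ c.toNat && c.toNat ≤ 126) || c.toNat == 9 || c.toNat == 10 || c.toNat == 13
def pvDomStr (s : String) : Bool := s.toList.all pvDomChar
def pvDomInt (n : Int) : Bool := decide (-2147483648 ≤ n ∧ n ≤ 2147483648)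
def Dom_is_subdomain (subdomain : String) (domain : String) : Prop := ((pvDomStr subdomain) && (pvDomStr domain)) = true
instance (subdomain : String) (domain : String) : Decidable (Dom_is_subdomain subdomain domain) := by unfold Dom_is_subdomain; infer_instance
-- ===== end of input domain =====

-- B replaces A's double list reversal + indexed prefix loop by a tail-slice comparison on the
-- label lists in original order; objective: simpler (same asymptotic cost).


-- ===== PORT A =====
-- helper split_domain: list(filter(None, domain.lower().split('.'))) then reverse
-- ('.split(".")' never raises for the nonempty separator, so the .getD [] default is unreachable)
def split_domain (domain : String) : List String :=
  let ans := ((PySem.Str.split? (PySem.Str.lower domain) ".").getD []).filter (fun l => l ≠ "")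
  ans.reverse

-- the 'for i,x in enumerate(d): if x != sd[i]: return False' loop; the length guard in
-- is_subdomain makes every index i in range, so the pyGetD default "" is unreachable
def is_subdomain_go (sd : List String) : List (Int × String) → Bool
  | [] => true
  | (i, x) :: rest => if x ≠ PySem.List.pyGetD sd i "" then false else is_subdomain_go sd rest

def is_subdomain (subdomain : String) (domain : String) : Bool :=
  let sd := split_domain subdomain
  let d := split_domain domain
  if sd.length < d.length then false
  else is_subdomain_go sd (PySem.List.enumerate d)

-- ===== PORT B =====
-- B's normalisation: labels in ORIGINAL order (no reverse)
def pvLabels (s : String) : List String :=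
  ((PySem.Str.split? (PySem.Str.lower s) ".").getD []).filter (fun l => l ≠ "")

def is_subdomain_alt (subdomain : String) (domain : String) : Bool :=
  let sd := pvLabels subdomain
  let d := pvLabels domain
  decide (d.length ≤ sd.length) &&
    (PySem.List.slice sd (some ((sd.length : Int) - (d.length : Int))) none == d)

-- ===== PRECONDITION & SPEC =====
def Spec_is_subdomain (subdomain : String) (domain : String) (out : Bool) : Prop := out = is_subdomain_alt subdomain domain
instance (subdomain : String) (domain : String) (out : Bool) : Decidable (Spec_is_subdomain subdomain domain out) := by unfold Spec_is_subdomain; infer_instance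

-- ===== CLAIM (what is proved, stated in full; the proofs are below) =====
def Claim_equal_is_subdomain : Prop := ∀ (subdomain : String) (domain : String), Dom_is_subdomain subdomain domain → Spec_is_subdomain subdomain domain (is_subdomain subdomain domain)

-- ===== LEMMAS AND PROOFS =====

-- A's loop over 'enumerate d' succeeds iff d agrees with sd pointwise at indices s, s+1, …
theorem is_subdomain_go_iff (sd : List String) (d : List String) (s : Int) :
    is_subdomain_go sd (PySem.List.enumerate d s) = true ↔
      ∀ (k : Nat) (h : k < d.length), d[k] = PySem.List.pyGetD sd (s + k) "" := by
  induction d generalizing s with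
  | nil => simp [PySem.List.enumerate_nil, is_subdomain_go]
  | cons x xs ih =>
    rw [PySem.List.enumerate_cons]
    simp only [is_subdomain_go]
    by_cases hx : x = PySem.List.pyGetD sd s ""
    · simp only [hx, ne_eq, not_true_eq_false, if_false, ih]
      constructor
      · intro h k hk
        cases k with
        | zero => simp
        | succ n =>
          have := h n (by simpa using hk)
          simpa [add_assoc, add_comm, add_left_comm] using this
      · intro h k hk
        have := h (k + 1) (by simpa using hk)
        simpa [add_assoc, add_comm, add_left_comm] using this
    · simp only [ne_eq, hx, not_false_eq_true, if_true, Bool.false_eq_true, false_iff]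
      intro h
      exact hx (by simpa using h 0 (by simp))

-- the heart of the equivalence, on arbitrary label lists: A's guarded reversed-prefix loop
-- equals B's length test plus tail-slice comparison
theorem key_lists (L D : List String) :
    (if L.length < D.length then false
     else is_subdomain_go L.reverse (PySem.List.enumerate D.reverse)) =
    (decide (D.length ≤ L.length) &&
      (PySem.List.slice L (some ((L.length : Int) - (D.length : Int))) none == D)) := by
  by_cases hlen : L.length < D.length
  · simp [hlen, Nat.not_le.mpr hlen]
  · rw [if_neg hlen]
    have hle : D.length ≤ L.length := Nat.le_of_not_lt hlen
    have hstart : ((L.length : Int) - (D.length : Int)) = ((L.length - D.length : Nat) : Int) := by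
      omega
    rw [hstart, PySem.List.slice_from_natCast]
    have hrev : (is_subdomain_go L.reverse (PySem.List.enumerate D.reverse) = true) ↔
        D.reverse <+: L.reverse := by
      rw [is_subdomain_go_iff, List.prefix_iff_getElem]
      constructor
      · intro h
        refine ⟨by simpa using hle, fun i hi => ?_⟩
        have := h i hi
        rw [PySem.List.pyGetD_eq_getElem L.reverse "" (by omega)
          (by simp at hi ⊢; omega)] at this
        simp only [Int.zero_add, Int.toNat_natCast] at this
        exact this
      · rintro ⟨_, h⟩ k hk
        rw [PySem.List.pyGetD_eq_getElem L.reverse "" (by omega)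
          (by simp at hk ⊢; omega)]
        have := h k hk
        simp only [Int.zero_add, Int.toNat_natCast]
        exact this
    have hsuf : (D.reverse <+: L.reverse) ↔ (L.drop (L.length - D.length) = D) := by
      rw [List.reverse_prefix, List.suffix_iff_eq_drop]
      exact ⟨fun h => h.symm, fun h => h.symm⟩
    by_cases hgo : is_subdomain_go L.reverse (PySem.List.enumerate D.reverse) = true
    · rw [hgo]
      simp [hle, hsuf.mp (hrev.mp hgo)]
    · rw [Bool.not_eq_true] at hgo
      rw [hgo]
      have : ¬ (L.drop (L.length - D.length) = D) := fun h =>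
        absurd (hrev.mpr (hsuf.mpr h)) (by simp [hgo])
      simp [this]

theorem is_subdomain_eq_alt (subdomain : String) (domain : String) :
    is_subdomain subdomain domain = is_subdomain_alt subdomain domain := by
  unfold is_subdomain is_subdomain_alt split_domain pvLabels
  dsimp only
  rw [List.length_reverse, List.length_reverse]
  exact key_lists _ _

-- ===== VERDICT (by name: the statement is the Claim_ definition above) =====
theorem is_subdomain_spec : Claim_equal_is_subdomain := by
  intro subdomain domain _
  exact is_subdomain_eq_alt subdomain domain
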